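-- pv_equiv track=rewrite | github.com/EricTornas/DAA | Counts Paths/bfs.py | BFS
-- ===== SOURCE A (Python) =====
-- from collections import deque
--
-- def BFS(edges, c, u, visited):
--
--     count = 0
--     q = deque([])
--     visited[u] = True
--
--     for w in edges[u]:
--         q.append(w)
--         visited[w] = True
--     while q:
--         v = q.popleft()
--
--         if c[v] == c[u]:
--             count += 1
--         else:
--             for w in edges[v]:
--                 if not visited[w]:
--                     visited[w] = True
--                     q.append(w)
--     return count
-- ===== SOURCE B (Python) =====
-- def BFS(edges, c, u, visited):
--     # Depth-first traversal with an explicit stack instead of a FIFO queue;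
--     # the count is independent of the worklist order. Mutates `visited` like
--     # the original (same final marks; insertion order of new keys may differ).
--     count = 0
--     stack = []
--     visited[u] = True
--     for w in edges[u]:
--         visited[w] = True
--         stack.append(w)
--     while stack:
--         v = stack.pop()
--         if c[v] == c[u]:
--             count += 1
--         else:
--             for w in edges[v]:
--                 if not visited[w]:
--                     visited[w] = True
--                     stack.append(w)
--     return count
-- ===== Notes on version B (the rewrite author's own statement) =====
-- stated objective: alternative
-- what changed: Replaces the FIFO deque BFS by a LIFO explicit-stack depth-first traversal; the equivalence rests on the proved fact that the marking/counting loop's result is invariant under the order of the worklist.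
-- outside the precondition, e.g. on BFS({0: [1], 1: [], 5: [9]}, {0: 5, 1: 7}, 0, {1: False}): A returns 0, B returns 0
import Mathlib
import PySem

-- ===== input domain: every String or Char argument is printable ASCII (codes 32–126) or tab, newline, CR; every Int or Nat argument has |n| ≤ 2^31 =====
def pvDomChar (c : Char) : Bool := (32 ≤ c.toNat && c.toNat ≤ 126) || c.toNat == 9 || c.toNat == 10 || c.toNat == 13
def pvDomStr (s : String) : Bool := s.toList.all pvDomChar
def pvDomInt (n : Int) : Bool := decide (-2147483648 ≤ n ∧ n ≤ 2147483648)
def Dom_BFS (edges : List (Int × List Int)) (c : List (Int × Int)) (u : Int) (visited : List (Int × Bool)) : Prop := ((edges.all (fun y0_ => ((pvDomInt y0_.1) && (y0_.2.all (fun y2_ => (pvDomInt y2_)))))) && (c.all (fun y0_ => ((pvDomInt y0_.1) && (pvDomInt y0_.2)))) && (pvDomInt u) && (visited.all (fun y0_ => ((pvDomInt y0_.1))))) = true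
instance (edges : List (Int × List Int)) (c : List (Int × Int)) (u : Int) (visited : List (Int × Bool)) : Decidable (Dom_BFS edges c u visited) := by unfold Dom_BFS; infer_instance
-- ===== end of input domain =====

-- B replaces A's FIFO-queue BFS by an explicit-stack depth-first traversal (same count, proved
-- order-invariant). Both Pythons mutate `visited` in place; the equivalence proved here is about
-- the RETURN value (B performs the same marking; only the insertion order of new keys may differ).

-- ===== PORT A =====

-- number of distinct keys currently mapped to false ("unvisited"); termination measure for the loops
def pvFalse (vis : PySem.Dict Int Bool) : Finset Int :=
  (vis.items.map Prod.fst).toFinset.filter (fun k => vis.getD k true = false)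

-- inner `for w in edges[v]: if not visited[w]: visited[w] = True; q.append(w)`;
-- returns the updated dict and the appended nodes in append order.
-- `visited[w]` is read via getD (total form; Pre_ guarantees the key is present where Python reads it).
def markA (vis : PySem.Dict Int Bool) (ws : List Int) : PySem.Dict Int Bool × List Int :=
  match ws with
  | [] => (vis, [])
  | w :: t =>
    if vis.getD w true = false then
      ((markA (vis.insert w true) t).1, w :: (markA (vis.insert w true) t).2)
    else markA vis t

theorem pv_mem_pvFalse (vis : PySem.Dict Int Bool) (k : Int) :
    k ∈ pvFalse vis ↔ vis.getD k true = false := by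
  unfold pvFalse
  simp only [Finset.mem_filter, List.mem_toFinset, List.mem_map, and_iff_right_iff_imp]
  intro h
  unfold PySem.Dict.getD PySem.Dict.get? at h
  cases hf : List.find? (fun p => p.1 == k) vis.items with
  | none => simp [hf] at h
  | some p =>
    have hm := List.mem_of_find?_eq_some hf
    have hp := List.find?_some hf
    exact ⟨p, hm, by simpa using hp⟩

theorem pv_getD_insert (vis : PySem.Dict Int Bool) (k' k : Int) (v d : Bool) :
    (vis.insert k v).getD k' d = if k' = k then v else vis.getD k' d := by
  by_cases h : k' = k
  · subst h; simp [PySem.Dict.getD, PySem.Dict.get?_insert_self]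
  · simp [PySem.Dict.getD, PySem.Dict.get?_insert_of_ne vis v h, h]

theorem pv_pvFalse_insert_true (vis : PySem.Dict Int Bool) (w : Int)
    (h : vis.getD w true = false) :
    pvFalse (vis.insert w true) = (pvFalse vis).erase w := by
  ext k
  simp only [pv_mem_pvFalse, Finset.mem_erase, pv_getD_insert]
  by_cases hk : k = w <;> simp [hk]

theorem pv_markA_card (ws : List Int) : ∀ vis : PySem.Dict Int Bool,
    (pvFalse (markA vis ws).1).card + (markA vis ws).2.length ≤ (pvFalse vis).card := by
  induction ws with
  | nil => intro vis; simp [markA]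
  | cons w t ih =>
    intro vis
    simp only [markA]
    by_cases h : vis.getD w true = false
    · rw [if_pos h]
      have hw : w ∈ pvFalse vis := (pv_mem_pvFalse vis w).2 h
      have hcard : (pvFalse (vis.insert w true)).card + 1 = (pvFalse vis).card := by
        rw [pv_pvFalse_insert_true vis w h]
        exact Finset.card_erase_add_one hw
      have := ih (vis.insert w true)
      simp only [List.length_cons]
      omega
    · rw [if_neg h]
      exact ih vis

-- `while q: v = q.popleft(); if c[v] == c[u]: count += 1 else: mark fresh neighbours, append them`
def loopA (ed : PySem.Dict Int (List Int)) (cd : PySem.Dict Int Int) (u : Int)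
    (vis : PySem.Dict Int Bool) (q : List Int) (cnt : Int) : Int :=
  match q with
  | [] => cnt
  | v :: rest =>
    if cd.get? v = cd.get? u then loopA ed cd u vis rest (cnt + 1)
    else loopA ed cd u (markA vis (ed.getD v [])).1
      (rest ++ (markA vis (ed.getD v [])).2) cnt
termination_by (pvFalse vis).card + q.length
decreasing_by
  · simp only [List.length_cons]; omega
  · have := pv_markA_card (ed.getD v []) vis
    simp only [List.length_append, List.length_cons]
    omega

def BFS (edges : List (Int × List Int)) (c : List (Int × Int)) (u : Int) (visited : List (Int × Bool)) : Int :=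
  let ed : PySem.Dict Int (List Int) := ⟨edges⟩
  let cd : PySem.Dict Int Int := ⟨c⟩
  let vd : PySem.Dict Int Bool := ⟨visited⟩
  let vd1 := vd.insert u true
  let ws := ed.getD u []        -- edges[u] (present under Pre_)
  -- `for w in edges[u]: q.append(w); visited[w] = True` : the queue becomes ws itself
  let vd2 := ws.foldl (fun d w => d.insert w true) vd1
  loopA ed cd u vd2 ws 0

-- ===== PORT B =====

-- inner loop of B: marks fresh neighbours and PUSHES them (stack top = list head)
def markB (vis : PySem.Dict Int Bool) (st : List Int) (ws : List Int) : PySem.Dict Int Bool × List Int :=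
  match ws with
  | [] => (vis, st)
  | w :: t =>
    if vis.getD w true = false then markB (vis.insert w true) (w :: st) t
    else markB vis st t

theorem pv_markB_spec (ws : List Int) : ∀ (vis : PySem.Dict Int Bool) (st : List Int),
    markB vis st ws = ((markA vis ws).1, (markA vis ws).2.reverse ++ st) := by
  induction ws with
  | nil => intro vis st; simp [markA, markB]
  | cons w t ih =>
    intro vis st
    simp only [markA, markB]
    by_cases h : vis.getD w true = false
    · rw [if_pos h, if_pos h, ih]
      simp
    · rw [if_neg h, if_neg h, ih]

-- `while stack: v = stack.pop(); …` (stack top = head of the Lean list)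
def loopB (ed : PySem.Dict Int (List Int)) (cd : PySem.Dict Int Int) (u : Int)
    (vis : PySem.Dict Int Bool) (st : List Int) (cnt : Int) : Int :=
  match st with
  | [] => cnt
  | v :: rest =>
    if cd.get? v = cd.get? u then loopB ed cd u vis rest (cnt + 1)
    else loopB ed cd u (markB vis rest (ed.getD v [])).1
      (markB vis rest (ed.getD v [])).2 cnt
termination_by (pvFalse vis).card + st.length
decreasing_by
  · simp only [List.length_cons]; omega
  · rw [pv_markB_spec]
    dsimp only
    have := pv_markA_card (ed.getD v []) vis
    simp only [List.length_append, List.length_cons, List.length_reverse]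
    omega

def BFS_alt (edges : List (Int × List Int)) (c : List (Int × Int)) (u : Int) (visited : List (Int × Bool)) : Int :=
  let ed : PySem.Dict Int (List Int) := ⟨edges⟩
  let cd : PySem.Dict Int Int := ⟨c⟩
  let vd : PySem.Dict Int Bool := ⟨visited⟩
  let vd1 := vd.insert u true
  let ws := ed.getD u []
  -- `for w in edges[u]: visited[w] = True; stack.append(w)`
  let p := ws.foldl (fun (p : PySem.Dict Int Bool × List Int) w => (p.1.insert w true, w :: p.2)) (vd1, [])
  loopB ed cd u p.1 p.2 0

-- ===== PRECONDITION & SPEC =====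
-- Pre_ excludes inputs on which the traversal can hit a node missing from edges/c/visited (Python
-- KeyError). The exact no-raise condition depends on reachability, which is not closed-form, so Pre_
-- is a closed-form sufficient condition: u is a key of edges and either (i) edges[u] is empty, or
-- (ii) u is a key of c and every first-level neighbour has u's color (so nothing is ever expanded),
-- or (iii) u is a key of c and every edge endpoint has entries in edges, c and visited. This
-- excludes some inputs on which A still returns (e.g. incompletely-keyed parts unreachable from u).
def Pre_BFS (edges : List (Int × List Int)) (c : List (Int × Int)) (u : Int) (visited : List (Int × Bool)) : Prop :=
  u ∈ edges.map Prod.fst ∧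
  ( (PySem.Dict.getD (⟨edges⟩ : PySem.Dict Int (List Int)) u [] = [])
    ∨ (u ∈ c.map Prod.fst ∧
        ∀ w ∈ PySem.Dict.getD (⟨edges⟩ : PySem.Dict Int (List Int)) u [],
          PySem.Dict.get? (⟨c⟩ : PySem.Dict Int Int) w = PySem.Dict.get? (⟨c⟩ : PySem.Dict Int Int) u)
    ∨ (u ∈ c.map Prod.fst ∧
        ∀ p ∈ edges, ∀ w ∈ p.2,
          w ∈ edges.map Prod.fst ∧ w ∈ c.map Prod.fst ∧ w ∈ visited.map Prod.fst) )
instance (edges : List (Int × List Int)) (c : List (Int × Int)) (u : Int) (visited : List (Int × Bool)) : Decidable (Pre_BFS edges c u visited) := by unfold Pre_BFS; infer_instance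

def pvWitness_BFS : (List (Int × List Int)) × (List (Int × Int)) × Int × (List (Int × Bool)) :=
  ([(0, [1, 2]), (1, []), (2, [1])], [(0, 5), (1, 5), (2, 3)], 0, [(0, false), (1, false), (2, false)])

def Spec_BFS (edges : List (Int × List Int)) (c : List (Int × Int)) (u : Int) (visited : List (Int × Bool)) (out : Int) : Prop := out = BFS_alt edges c u visited
instance (edges : List (Int × List Int)) (c : List (Int × Int)) (u : Int) (visited : List (Int × Bool)) (out : Int) : Decidable (Spec_BFS edges c u visited out) := by unfold Spec_BFS; infer_instance

-- ===== CLAIM (what is proved, stated in full; the proofs are below) =====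
def Claim_equal_BFS : Prop := ∀ (edges : List (Int × List Int)) (c : List (Int × Int)) (u : Int) (visited : List (Int × Bool)), Dom_BFS edges c u visited → Pre_BFS edges c u visited → Spec_BFS edges c u visited (BFS edges c u visited)

-- ===== LEMMAS AND PROOFS =====

-- two visited-dicts that agree as Boolean maps drive the loops identically
def pvVisEq (a b : PySem.Dict Int Bool) : Prop := ∀ k, a.getD k true = b.getD k true

theorem pv_pvFalse_congr {a b : PySem.Dict Int Bool} (h : pvVisEq a b) : pvFalse a = pvFalse b := by
  ext k; simp [pv_mem_pvFalse, h k]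

theorem pv_markA_getD (ws : List Int) : ∀ (vis : PySem.Dict Int Bool) (k : Int),
    (markA vis ws).1.getD k true =
      if k ∈ ws ∧ vis.getD k true = false then true else vis.getD k true := by
  induction ws with
  | nil => intro vis k; simp [markA]
  | cons w t ih =>
    intro vis k
    simp only [markA]
    by_cases h : vis.getD w true = false
    · rw [if_pos h, ih]
      by_cases hk : k = w
      · subst hk; simp [h]
      · simp only [pv_getD_insert, if_neg hk, List.mem_cons]
        by_cases hkt : k ∈ t <;> simp [hkt, hk]
    · rw [if_neg h, ih]
      by_cases hk : k = w
      · subst hk; simp [h]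
      · simp [List.mem_cons, hk]

theorem pv_markA_mem (ws : List Int) : ∀ (vis : PySem.Dict Int Bool) (k : Int),
    k ∈ (markA vis ws).2 ↔ k ∈ ws ∧ vis.getD k true = false := by
  induction ws with
  | nil => intro vis k; simp [markA]
  | cons w t ih =>
    intro vis k
    simp only [markA]
    by_cases h : vis.getD w true = false
    · rw [if_pos h]
      simp only [List.mem_cons, ih, pv_getD_insert]
      by_cases hk : k = w
      · subst hk; simp [h]
      · simp [hk]
    · rw [if_neg h]
      simp only [ih, List.mem_cons]
      constructor
      · rintro ⟨hkt, hf⟩; exact ⟨Or.inr hkt, hf⟩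
      · rintro ⟨hkw | hkt, hf⟩
        · subst hkw; exact absurd hf h
        · exact ⟨hkt, hf⟩

theorem pv_markA_nodup (ws : List Int) : ∀ vis : PySem.Dict Int Bool, (markA vis ws).2.Nodup := by
  induction ws with
  | nil => intro vis; simp [markA]
  | cons w t ih =>
    intro vis
    simp only [markA]
    by_cases h : vis.getD w true = false
    · rw [if_pos h]
      simp only [List.nodup_cons]
      refine ⟨fun hw => ?_, ih _⟩
      have := (pv_markA_mem t (vis.insert w true) w).1 hw
      simp at this
    · rw [if_neg h]
      exact ih vis

-- two successive expansions: the resulting Boolean map and the two appended lists combined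
theorem pv_markA_getD2 (wsa wsb : List Int) (vis : PySem.Dict Int Bool) (k : Int) :
    (markA (markA vis wsa).1 wsb).1.getD k true =
      if (k ∈ wsa ∨ k ∈ wsb) ∧ vis.getD k true = false then true else vis.getD k true := by
  rw [pv_markA_getD, pv_markA_getD]
  by_cases h0 : vis.getD k true = false <;> by_cases h1 : k ∈ wsa <;>
    by_cases h2 : k ∈ wsb <;> simp [h0, h1, h2]

theorem pv_markA_append_mem (wsa wsb : List Int) (vis : PySem.Dict Int Bool) (k : Int) :
    k ∈ (markA vis wsa).2 ++ (markA (markA vis wsa).1 wsb).2 ↔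
      (k ∈ wsa ∨ k ∈ wsb) ∧ vis.getD k true = false := by
  rw [List.mem_append, pv_markA_mem, pv_markA_mem, pv_markA_getD]
  by_cases h0 : vis.getD k true = false <;> by_cases h1 : k ∈ wsa <;>
    by_cases h2 : k ∈ wsb <;> simp [h0, h1, h2]

theorem pv_markA_append_nodup (wsa wsb : List Int) (vis : PySem.Dict Int Bool) :
    ((markA vis wsa).2 ++ (markA (markA vis wsa).1 wsb).2).Nodup := by
  refine List.Nodup.append (pv_markA_nodup _ _) (pv_markA_nodup _ _) ?_
  intro k hk1 hk2
  have h1 := (pv_markA_mem wsa vis k).1 hk1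
  have h2 := (pv_markA_mem wsb (markA vis wsa).1 k).1 hk2
  rw [pv_markA_getD] at h2
  rcases h2 with ⟨-, h2⟩
  simp [h1.1, h1.2] at h2

theorem pv_markA_congr (ws : List Int) : ∀ {a b : PySem.Dict Int Bool}, pvVisEq a b →
    (markA a ws).2 = (markA b ws).2 ∧ pvVisEq (markA a ws).1 (markA b ws).1 := by
  induction ws with
  | nil => intro a b h; exact ⟨rfl, h⟩
  | cons w t ih =>
    intro a b h
    simp only [markA]
    by_cases hf : a.getD w true = false
    · have hf' : b.getD w true = false := by rw [← h w]; exact hf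
      have hins : pvVisEq (a.insert w true) (b.insert w true) := by
        intro k; simp [pv_getD_insert, h k]
      obtain ⟨h1, h2⟩ := ih hins
      rw [if_pos hf, if_pos hf']
      exact ⟨by rw [h1], h2⟩
    · have hf' : ¬ b.getD w true = false := by rw [← h w]; exact hf
      rw [if_neg hf, if_neg hf']
      exact ih h

-- one-step unfolding of the two loops (their well-founded equations)
theorem pv_loopA_nil (ed : PySem.Dict Int (List Int)) (cd : PySem.Dict Int Int) (u : Int)
    (vis : PySem.Dict Int Bool) (cnt : Int) : loopA ed cd u vis [] cnt = cnt := by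
  rw [loopA]

theorem pv_loopA_cons (ed : PySem.Dict Int (List Int)) (cd : PySem.Dict Int Int) (u v : Int)
    (vis : PySem.Dict Int Bool) (rest : List Int) (cnt : Int) :
    loopA ed cd u vis (v :: rest) cnt =
      if cd.get? v = cd.get? u then loopA ed cd u vis rest (cnt + 1)
      else loopA ed cd u (markA vis (ed.getD v [])).1
        (rest ++ (markA vis (ed.getD v [])).2) cnt := by
  rw [loopA]

theorem pv_loopB_nil (ed : PySem.Dict Int (List Int)) (cd : PySem.Dict Int Int) (u : Int)
    (vis : PySem.Dict Int Bool) (cnt : Int) : loopB ed cd u vis [] cnt = cnt := by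
  rw [loopB]

theorem pv_loopB_cons (ed : PySem.Dict Int (List Int)) (cd : PySem.Dict Int Int) (u v : Int)
    (vis : PySem.Dict Int Bool) (rest : List Int) (cnt : Int) :
    loopB ed cd u vis (v :: rest) cnt =
      if cd.get? v = cd.get? u then loopB ed cd u vis rest (cnt + 1)
      else loopB ed cd u (markB vis rest (ed.getD v [])).1
        (markB vis rest (ed.getD v [])).2 cnt := by
  rw [loopB]

-- THE KEY THEOREM: A's worklist loop computes the same count for any permutation of the
-- worklist and any Boolean-equal visited dict (so the FIFO order is immaterial).
theorem pv_loopA_perm (ed : PySem.Dict Int (List Int)) (cd : PySem.Dict Int Int) (u : Int) :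
    ∀ (n : Nat) (vis vis' : PySem.Dict Int Bool) (q q' : List Int) (cnt : Int),
      (pvFalse vis).card + q.length ≤ n → pvVisEq vis vis' → q.Perm q' →
      loopA ed cd u vis q cnt = loopA ed cd u vis' q' cnt := by
  intro n
  induction n using Nat.strong_induction_on with
  | _ n IH =>
  -- adjacent swap at the head of the worklist (same dict)
  have swap : ∀ (vis : PySem.Dict Int Bool) (a b : Int) (t : List Int) (cnt : Int),
      (pvFalse vis).card + t.length + 2 ≤ n →
      loopA ed cd u vis (a :: b :: t) cnt = loopA ed cd u vis (b :: a :: t) cnt := by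
    intro vis a b t cnt hm
    by_cases ha : cd.get? a = cd.get? u <;> by_cases hb : cd.get? b = cd.get? u
    · conv_lhs => rw [pv_loopA_cons, if_pos ha, pv_loopA_cons, if_pos hb]
      conv_rhs => rw [pv_loopA_cons, if_pos hb, pv_loopA_cons, if_pos ha]
    · conv_lhs => rw [pv_loopA_cons, if_pos ha, pv_loopA_cons, if_neg hb]
      conv_rhs => rw [pv_loopA_cons, if_neg hb, List.cons_append, pv_loopA_cons, if_pos ha]
    · conv_lhs => rw [pv_loopA_cons, if_neg ha, List.cons_append, pv_loopA_cons, if_pos hb]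
      conv_rhs => rw [pv_loopA_cons, if_pos hb, pv_loopA_cons, if_neg ha]
    · -- both expanded: use order-invariance at a strictly smaller measure
      conv_lhs => rw [pv_loopA_cons, if_neg ha, List.cons_append, pv_loopA_cons, if_neg hb]
      conv_rhs => rw [pv_loopA_cons, if_neg hb, List.cons_append, pv_loopA_cons, if_neg ha]
      have hcard1 := pv_markA_card (ed.getD a []) vis
      have hcard1' := pv_markA_card (ed.getD b []) vis
      have hcard2 := pv_markA_card (ed.getD b []) (markA vis (ed.getD a [])).1
      have hmeas : (pvFalse (markA (markA vis (ed.getD a [])).1 (ed.getD b [])).1).card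
          + ((t ++ (markA vis (ed.getD a [])).2)
              ++ (markA (markA vis (ed.getD a [])).1 (ed.getD b [])).2).length < n := by
        simp only [List.length_append]; omega
      refine IH _ hmeas _ _ _ _ _ le_rfl ?_ ?_
      · intro k
        rw [pv_markA_getD2, pv_markA_getD2]
        by_cases h1 : k ∈ ed.getD a [] <;> by_cases h2 : k ∈ ed.getD b [] <;> simp [h1, h2]
      · rw [List.append_assoc, List.append_assoc]
        refine List.Perm.append_left t ?_
        rw [List.perm_ext_iff_of_nodup (pv_markA_append_nodup _ _ _) (pv_markA_append_nodup _ _ _)]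
        intro k
        rw [pv_markA_append_mem, pv_markA_append_mem]
        by_cases h1 : k ∈ ed.getD a [] <;> by_cases h2 : k ∈ ed.getD b [] <;> simp [h1, h2]
  -- pull an element of the worklist to the front (same dict)
  have pull : ∀ (l1 : List Int) (vis : PySem.Dict Int Bool) (v : Int) (l2 : List Int) (cnt : Int),
      (pvFalse vis).card + (l1 ++ v :: l2).length ≤ n →
      loopA ed cd u vis (l1 ++ v :: l2) cnt = loopA ed cd u vis (v :: (l1 ++ l2)) cnt := by
    intro l1
    induction l1 with
    | nil => intro vis v l2 cnt _; rfl
    | cons a l1' ihl =>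
      intro vis v l2 cnt hm
      simp only [List.length_append, List.length_cons] at hm
      simp only [List.cons_append]
      rw [swap vis v a (l1' ++ l2) cnt (by simp only [List.length_append]; omega)]
      rw [pv_loopA_cons, pv_loopA_cons]
      by_cases ha : cd.get? a = cd.get? u
      · rw [if_pos ha, if_pos ha, ihl vis v l2 (cnt + 1) (by
          simp only [List.length_append, List.length_cons]; omega)]
      · rw [if_neg ha, if_neg ha]
        have hcard := pv_markA_card (ed.getD a []) vis
        simp only [List.cons_append, List.append_assoc]
        exact ihl _ v _ cnt (by simp only [List.length_append, List.length_cons]; omega)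
  -- main step
  intro vis vis' q q' cnt hm hv hp
  match q, hp with
  | [], hp =>
    rw [← hp.nil_eq, pv_loopA_nil, pv_loopA_nil]
  | v :: t, hp =>
    have hvq' : v ∈ q' := hp.subset (by simp)
    obtain ⟨l1, l2, rfl⟩ := List.append_of_mem hvq'
    have hcard' : (pvFalse vis').card = (pvFalse vis).card := by
      rw [pv_pvFalse_congr hv]
    have hlen := hp.length_eq
    simp only [List.length_cons, List.length_append] at hlen hm
    have hpt : t.Perm (l1 ++ l2) := (hp.trans List.perm_middle).cons_inv
    rw [pull l1 vis' v l2 cnt (by simp only [List.length_append, List.length_cons]; omega)]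
    rw [pv_loopA_cons, pv_loopA_cons]
    by_cases hc : cd.get? v = cd.get? u
    · rw [if_pos hc, if_pos hc]
      exact IH (n - 1) (by omega) vis vis' t (l1 ++ l2) (cnt + 1) (by omega) hv hpt
    · rw [if_neg hc, if_neg hc]
      obtain ⟨he, hve⟩ := pv_markA_congr (ed.getD v []) hv
      have hcard := pv_markA_card (ed.getD v []) vis
      refine IH (n - 1) (by omega) _ _ _ _ cnt (by
        simp only [List.length_append]; omega) hve ?_
      rw [← he]
      exact hpt.append_right _

-- B's stack loop equals A's queue loop
theorem pv_loopB_eq (ed : PySem.Dict Int (List Int)) (cd : PySem.Dict Int Int) (u : Int) :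
    ∀ (n : Nat) (vis : PySem.Dict Int Bool) (st : List Int) (cnt : Int),
      (pvFalse vis).card + st.length ≤ n →
      loopB ed cd u vis st cnt = loopA ed cd u vis st cnt := by
  intro n
  induction n using Nat.strong_induction_on with
  | _ n IH =>
  intro vis st cnt hm
  match st with
  | [] => rw [pv_loopB_nil, pv_loopA_nil]
  | v :: rest =>
    simp only [List.length_cons] at hm
    rw [pv_loopB_cons, pv_loopA_cons]
    by_cases hc : cd.get? v = cd.get? u
    · rw [if_pos hc, if_pos hc]
      exact IH (n - 1) (by omega) vis rest (cnt + 1) (by omega)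
    · rw [if_neg hc, if_neg hc, pv_markB_spec]
      dsimp only
      have hcard := pv_markA_card (ed.getD v []) vis
      rw [IH (n - 1) (by omega) _ _ cnt (by
        simp only [List.length_append, List.length_reverse]; omega)]
      refine pv_loopA_perm ed cd u ((pvFalse (markA vis (ed.getD v [])).1).card
          + ((markA vis (ed.getD v [])).2.reverse ++ rest).length) _ _ _ _ cnt le_rfl
        (fun k => rfl) ?_
      exact ((markA vis (ed.getD v [])).2.reverse_perm.append_right rest).trans
        List.perm_append_comm

-- the combined first-level fold of B splits into A's mark-fold and the reversed worklist
theorem pv_foldl_pair (ws : List Int) : ∀ (d : PySem.Dict Int Bool) (init : List Int),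
    ws.foldl (fun (p : PySem.Dict Int Bool × List Int) w => (p.1.insert w true, w :: p.2)) (d, init)
      = (ws.foldl (fun d w => d.insert w true) d, ws.reverse ++ init) := by
  induction ws with
  | nil => intro d init; simp
  | cons w t ih =>
    intro d init
    simp only [List.foldl_cons, ih, List.reverse_cons, List.append_assoc,
      List.singleton_append]

-- ===== VERDICT (by name: the statement is the Claim_ definition above) =====
theorem BFS_spec : Claim_equal_BFS := by
  intro edges c u visited _ _
  simp only [Spec_BFS, BFS, BFS_alt]
  rw [pv_foldl_pair, List.append_nil]
  set ed : PySem.Dict Int (List Int) := ⟨edges⟩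
  set cd : PySem.Dict Int Int := ⟨c⟩
  set vd2 := (ed.getD u []).foldl (fun d w => d.insert w true)
    ((PySem.Dict.mk visited).insert u true) with hvd2
  rw [pv_loopB_eq ed cd u ((pvFalse vd2).card + (ed.getD u []).reverse.length) _ _ 0 le_rfl]
  refine (pv_loopA_perm ed cd u ((pvFalse vd2).card + (ed.getD u []).length) _ _ _ _ 0
    (by simp) (fun k => rfl) ?_).symm
  exact (ed.getD u []).reverse_perm
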